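-- pv_equiv track=rewrite | github.com/cobobrien/credit-usage | services/calculate_message_cost.py | get_words
-- ===== SOURCE A (Python) =====
-- from typing import List, Optional, Tuple
--
-- def get_words(text: str) -> List[str]:
--     """Extracts words from text using regex pattern."""
--     # First replace special characters (except apostrophes and hyphens) with spaces
--     result = ""
--     for i, c in enumerate(text):
--         if c.isalnum() or c in "'- ":
--             result += c
--         else:
--             # Add space only if we're not already looking at a space
--             if i == 0 or result[-1] != " ":
--                 result += " "
--
--     # Split and filter empty strings
--     return [word for word in result.lower().split() if word]
-- ===== SOURCE B (Python) =====
-- def get_words(text):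
--     """Single-pass tokenizer: accumulate word chars into a buffer, flush on separators."""
--     words = []
--     buf = []
--     for c in text:
--         if c.isalnum() or c == "'" or c == "-":
--             buf.append(c.lower())
--         elif buf:
--             words.append("".join(buf))
--             buf = []
--     if buf:
--         words.append("".join(buf))
--     return words
-- ===== Notes on version B (the rewrite author's own statement) =====
-- stated objective: alternative
-- what changed: A builds an intermediate normalized string (special chars replaced by spaces, with duplicate-space suppression) and then lowercases, splits and filters it; B tokenizes in a single pass with a word buffer that is flushed on each separator, never materializing the intermediate string.
import Mathlib
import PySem

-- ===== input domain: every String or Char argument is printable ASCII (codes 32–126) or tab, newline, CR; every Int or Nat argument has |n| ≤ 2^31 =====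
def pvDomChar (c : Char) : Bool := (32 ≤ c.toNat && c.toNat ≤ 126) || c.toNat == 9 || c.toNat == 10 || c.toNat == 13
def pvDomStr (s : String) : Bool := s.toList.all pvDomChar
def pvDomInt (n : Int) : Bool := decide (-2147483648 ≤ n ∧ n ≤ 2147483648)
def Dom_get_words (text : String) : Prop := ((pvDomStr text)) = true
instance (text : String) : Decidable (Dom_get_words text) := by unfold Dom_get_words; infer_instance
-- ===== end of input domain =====

-- B replaces A's normalized intermediate string + split/filter pass by a single-pass
-- buffer-and-flush tokenizer (objective: alternative decomposition, one pass).

-- ===== PORT A =====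
def get_words (text : String) : List String :=
  let result : List Char :=
    (PySem.List.enumerate text.toList 0).foldl
      (fun (result : List Char) ic =>
        if PySem.Chars.isalnum ic.2 || PySem.Chars.isIn [ic.2] ("'- ".toList) then
          result ++ [ic.2]
        else
          if ic.1 == 0 || PySem.List.pyGetD result (-1) ' ' != ' ' then result ++ [' ']
          else result)
      []
  ((PySem.Chars.split₀ (PySem.Chars.lower result)).filter (fun w => !w.isEmpty)).map
    (fun w => String.ofList w)

-- ===== PORT B =====
-- the for-loop of Source B, state = (buffer of lowered word chars, words so far)
def tokGo : List Char → List Char → List String → List String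
  | [], buf, words => if buf.isEmpty then words else words ++ [String.ofList buf]
  | c :: cs, buf, words =>
    if PySem.Chars.isalnum c || c == '\'' || c == '-' then
      tokGo cs (buf ++ [PySem.Chars.lowerChar c]) words
    else if !buf.isEmpty then tokGo cs [] (words ++ [String.ofList buf])
    else tokGo cs buf words

def get_words_alt (text : String) : List String := tokGo text.toList [] []

-- ===== PRECONDITION & SPEC =====
def Spec_get_words (text : String) (out : List String) : Prop := out = get_words_alt text
instance (text : String) (out : List String) : Decidable (Spec_get_words text out) := by unfold Spec_get_words; infer_instance

-- ===== CLAIM (what is proved, stated in full; the proofs are below) =====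
def Claim_equal_get_words : Prop := ∀ (text : String), Dom_get_words text → Spec_get_words text (get_words text)

-- ===== LEMMAS AND PROOFS =====

-- word characters (kept in a word by both programs)
def wordc (c : Char) : Bool := PySem.Chars.isalnum c || c == '\'' || c == '-'

-- characters A keeps verbatim in its normalized string (word chars plus the space)
def keepc (c : Char) : Bool := wordc c || c == ' '

-- A's normalized string, as a function of the remaining text and of the flag
-- "the string built so far ends with a space" (start state: flag = false, string empty)
def normA : List Char → Bool → List Char
  | [], _ => []
  | c :: cs, flag =>
    if keepc c then c :: normA cs (c == ' ')
    else if flag then normA cs true else ' ' :: normA cs true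

-- reference form of str.split(): skip spaces, otherwise take the maximal non-space run
def mySplit : List Char → List (List Char)
  | [] => []
  | c :: cs =>
    if PySem.Chars.isspace c then mySplit cs
    else (c :: cs.takeWhile (fun d => !PySem.Chars.isspace d)) ::
      mySplit (cs.dropWhile (fun d => !PySem.Chars.isspace d))
termination_by l => l.length
decreasing_by
  all_goals simp only [List.length_cons, Nat.lt_succ_iff]
  all_goals first
    | exact Nat.le_refl _
    | exact List.length_dropWhile_le _ cs

lemma mySplit_cons (c : Char) (cs : List Char) :
    mySplit (c :: cs) =
      (if PySem.Chars.isspace c then mySplit cs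
       else (c :: cs.takeWhile (fun d => !PySem.Chars.isspace d)) ::
         mySplit (cs.dropWhile (fun d => !PySem.Chars.isspace d))) := by
  rw [mySplit.eq_def]

lemma isIn_singleton (c : Char) :
    PySem.Chars.isIn [c] ("'- ".toList) = (c == '\'' || c == '-' || c == ' ') := by
  apply Bool.eq_iff_iff.mpr
  rw [PySem.Chars.isIn_iff_infix, List.singleton_infix_iff]
  simp [show ("'- ".toList) = ['\'', '-', ' '] from rfl, or_assoc]

lemma go_spec (cs : List Char) : ∀ (cur : List Char) (acc : List (List Char)),
    PySem.Chars.split₀.go cs cur acc =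
      acc.reverse ++ (if cur.isEmpty then mySplit cs
        else (cur.reverse ++ cs.takeWhile (fun d => !PySem.Chars.isspace d)) ::
          mySplit (cs.dropWhile (fun d => !PySem.Chars.isspace d))) := by
  induction cs with
  | nil =>
    intro cur acc
    rw [PySem.Chars.split₀.go]
    cases cur with
    | nil => simp [mySplit]
    | cons b bs => simp [mySplit]
  | cons c cs ih =>
    intro cur acc
    rw [PySem.Chars.split₀.go]
    by_cases hs : PySem.Chars.isspace c = true
    · rw [if_pos hs, mySplit_cons, if_pos hs]
      rcases cur with _ | ⟨b, bs⟩
      · simp [ih]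
      · rw [if_neg (by simp), ih]
        simp [hs, mySplit_cons]
    · have hs' : PySem.Chars.isspace c = false := by simp_all
      rw [if_neg (by simp [hs']), ih]
      rcases cur with _ | ⟨b, bs⟩
      · simp [mySplit_cons, hs']
      · simp [hs']

lemma split₀_eq_mySplit (cs : List Char) : PySem.Chars.split₀ cs = mySplit cs := by
  simp [PySem.Chars.split₀, go_spec]

lemma foldA_eq (cs : List Char) : ∀ (s : Int) (r : List Char), 0 ≤ s → (s = 0 ↔ r = []) →
    (PySem.List.enumerate cs s).foldl
      (fun (result : List Char) ic =>
        if PySem.Chars.isalnum ic.2 || PySem.Chars.isIn [ic.2] ("'- ".toList) then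
          result ++ [ic.2]
        else
          if ic.1 == 0 || PySem.List.pyGetD result (-1) ' ' != ' ' then result ++ [' ']
          else result) r
    = r ++ normA cs (r.getLast? == some ' ') := by
  induction cs with
  | nil => intro s r _ _; simp [PySem.List.enumerate_nil, normA]
  | cons c cs ih =>
    intro s r hs hsr
    rw [PySem.List.enumerate_cons, List.foldl_cons]
    by_cases hk : keepc c = true
    · have htest : (PySem.Chars.isalnum c || PySem.Chars.isIn [c] ("'- ".toList)) = true := by
        rw [isIn_singleton]
        simp only [keepc, wordc] at hk
        simp only [Bool.or_assoc] at hk ⊢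
        exact hk
      rw [if_pos htest]
      rw [ih (s + 1) (r ++ [c]) (by omega) (by constructor <;> intro h <;> simp_all <;> omega)]
      rw [normA, if_pos hk, List.getLast?_concat]
      simp
    · have htest : (PySem.Chars.isalnum c || PySem.Chars.isIn [c] ("'- ".toList)) = false := by
        rw [isIn_singleton]
        simp only [keepc, wordc] at hk
        simp only [Bool.or_assoc] at hk ⊢
        simp_all
      rw [if_neg (by rw [htest]; simp)]
      rcases hr : r with _ | ⟨b, bs⟩
      · -- r = [] so s = 0 : append a space
        have hs0 : s = 0 := hsr.mpr hr
        subst hs0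
        rw [if_pos (show ((((0 : Int), c).1 == 0) || (PySem.List.pyGetD ([] : List Char) (-1) ' ' != ' ')) = true by simp)]
        rw [ih (0 + 1) ([] ++ [' ']) (by omega) (by simp)]
        simp [normA, hk]
      · have hrne : (b :: bs) ≠ ([] : List Char) := by simp
        have hsne : ¬ s = 0 := by
          intro h0; exact hrne (hr ▸ hsr.mp h0)
        have hgd : PySem.List.pyGetD (b :: bs) (-1) ' ' = (b :: bs).getLast hrne :=
          PySem.List.pyGetD_neg_one (b :: bs) ' ' hrne
        have hgl : (b :: bs).getLast? = some ((b :: bs).getLast hrne) :=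
          List.getLast?_eq_some_getLast hrne
        by_cases hlast : (b :: bs).getLast hrne = ' '
        · -- ends with space: skip
          have hcond : ((s == 0) || (PySem.List.pyGetD (b :: bs) (-1) ' ' != ' ')) = false := by
            simp [hsne, hgd, hlast]
          rw [if_neg (by rw [hcond]; simp)]
          rw [ih (s + 1) (b :: bs) (by omega) (by simp; omega)]
          rw [hgl, hlast]
          simp [normA, hk]
        · -- does not end with space: append a space
          have hcond : ((s == 0) || (PySem.List.pyGetD (b :: bs) (-1) ' ' != ' ')) = true := by
            simp [hgd, hlast]
          rw [if_pos hcond]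
          rw [ih (s + 1) ((b :: bs) ++ [' ']) (by omega) (by simp; omega)]
          rw [List.getLast?_concat]
          have hfl : ((b :: bs).getLast? == some ' ') = false := by rw [hgl]; simp [hlast]
          simp [normA, hk, hfl]

lemma mySplit_space (xs : List Char) : mySplit (' ' :: xs) = mySplit xs := by
  have h : PySem.Chars.isspace ' ' = true := by decide
  rw [mySplit.eq_def]
  simp [h]

lemma mySplit_word (buf : List Char) (hb : ∀ c ∈ buf, PySem.Chars.isspace c = false) :
    ∀ rest, mySplit (buf ++ ' ' :: rest) = (if buf.isEmpty then [] else [buf]) ++ mySplit rest := by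
  intro rest
  cases buf with
  | nil => simp [mySplit_space]
  | cons b bs =>
    have hb0 : PySem.Chars.isspace b = false := hb b (by simp)
    have hbs : ∀ a ∈ bs, (fun d => !PySem.Chars.isspace d) a = true := by
      intro a ha; simp [hb a (by simp [ha])]
    rw [List.cons_append, mySplit.eq_def]
    simp only [hb0, Bool.false_eq_true, if_false, List.isEmpty_cons]
    rw [List.takeWhile_append, List.takeWhile_eq_self_iff.mpr hbs]
    rw [List.dropWhile_append, List.dropWhile_eq_nil_iff.mpr hbs]
    have hsp : PySem.Chars.isspace ' ' = true := by decide
    simp [hsp, mySplit_space]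

lemma mySplit_word_nil (buf : List Char) (hb : ∀ c ∈ buf, PySem.Chars.isspace c = false) :
    mySplit buf = if buf.isEmpty then [] else [buf] := by
  cases buf with
  | nil => simp [mySplit]
  | cons b bs =>
    have hb0 : PySem.Chars.isspace b = false := hb b (by simp)
    have hbs : ∀ a ∈ bs, (fun d => !PySem.Chars.isspace d) a = true := by
      intro a ha; simp [hb a (by simp [ha])]
    rw [mySplit.eq_def]
    simp only [hb0, Bool.false_eq_true, if_false, List.isEmpty_cons]
    rw [List.takeWhile_eq_self_iff.mpr hbs, List.dropWhile_eq_nil_iff.mpr hbs]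
    simp [mySplit]

lemma char_toNat_le_of_le {c d : Char} (h : c ≤ d) : c.toNat ≤ d.toNat := by
  simp only [Char.le_def, Char.toNat] at *
  exact UInt32.le_iff_toNat_le.mp h

lemma not_space_of_range (c : Char) (h1 : 48 ≤ c.toNat) (h2 : c.toNat ≤ 122) :
    PySem.Chars.isspace c = false := by
  simp only [PySem.Chars.isspace, Bool.or_eq_false_iff, Bool.and_eq_false_iff,
    decide_eq_false_iff_not]
  omega

lemma wordc_not_space (c : Char) (h : wordc c = true) :
    PySem.Chars.isspace (PySem.Chars.lowerChar c) = false ∧ PySem.Chars.isspace c = false := by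
  simp only [wordc, Bool.or_eq_true, beq_iff_eq] at h
  rcases h with (h | h) | h
  · simp only [PySem.Chars.isalnum, PySem.Chars.isalpha, PySem.Chars.isdigit,
      PySem.Chars.isupper, PySem.Chars.islower, Bool.or_eq_true, Bool.and_eq_true,
      decide_eq_true_eq] at h
    have hb : 48 ≤ c.toNat ∧ c.toNat ≤ 122 := by
      rcases h with (⟨h1, h2⟩ | ⟨h1, h2⟩) | ⟨h1, h2⟩ <;>
      exact ⟨le_trans (by decide) (char_toNat_le_of_le h1),
               le_trans (char_toNat_le_of_le h2) (by decide)⟩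
    by_cases hu : PySem.Chars.isupper c = true
    · have hr : 65 ≤ c.toNat ∧ c.toNat ≤ 90 := by
        simp only [PySem.Chars.isupper, Bool.and_eq_true, decide_eq_true_eq] at hu
        exact ⟨le_trans (by decide) (char_toNat_le_of_le hu.1),
               le_trans (char_toNat_le_of_le hu.2) (by decide)⟩
      have hv : (c.toNat + 32).isValidChar := Or.inl (by omega)
      have hlc : (PySem.Chars.lowerChar c).toNat = c.toNat + 32 := by
        simp only [PySem.Chars.lowerChar, hu, if_pos]
        rw [Char.toNat_ofNat, if_pos hv]
      refine ⟨not_space_of_range _ (by omega) (by omega), not_space_of_range _ hb.1 hb.2⟩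
    · have hlc : PySem.Chars.lowerChar c = c := by
        simp [PySem.Chars.lowerChar, hu]
      rw [hlc]
      exact ⟨not_space_of_range _ hb.1 hb.2, not_space_of_range _ hb.1 hb.2⟩
  · subst h; exact ⟨by decide, by decide⟩
  · subst h; exact ⟨by decide, by decide⟩

lemma normA_flags (cs : List Char) :
    normA cs false = normA cs true ∨ normA cs false = ' ' :: normA cs true := by
  cases cs with
  | nil => left; rfl
  | cons c cs =>
    by_cases h : keepc c = true
    · left; simp [normA, h]
    · right; simp [normA, h]

lemma tokGo_spec (cs : List Char) : ∀ (buf : List Char) (acc : List String),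
    (∀ c ∈ buf, PySem.Chars.isspace c = false) →
    tokGo cs buf acc =
      acc ++ ((mySplit (buf ++ PySem.Chars.lower (normA cs buf.isEmpty))).filter
        (fun w => !w.isEmpty)).map (fun w => String.ofList w) := by
  induction cs with
  | nil =>
    intro buf acc hb
    rw [tokGo]
    rw [show normA [] buf.isEmpty = [] from rfl]
    rw [show PySem.Chars.lower [] = [] from rfl, List.append_nil]
    rw [mySplit_word_nil buf hb]
    cases buf with
    | nil => simp
    | cons b bs => simp
  | cons c cs ih =>
    intro buf acc hb
    rw [tokGo]
    by_cases hw : wordc c = true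
    · rw [if_pos (show (PySem.Chars.isalnum c || c == '\'' || c == '-') = true from hw)]
      have hlsp := (wordc_not_space c hw).1
      have hcsp := (wordc_not_space c hw).2
      have hb' : ∀ d ∈ buf ++ [PySem.Chars.lowerChar c], PySem.Chars.isspace d = false := by
        intro d hd
        rcases List.mem_append.mp hd with hd | hd
        · exact hb d hd
        · rw [List.mem_singleton.mp hd]; exact hlsp
      rw [ih (buf ++ [PySem.Chars.lowerChar c]) acc hb']
      have hkc : keepc c = true := by simp [keepc, hw]
      have hcs : (c == ' ') = false := by
        apply beq_eq_false_iff_ne.mpr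
        intro hcc; rw [hcc] at hcsp; exact absurd hcsp (by decide)
      have hn : normA (c :: cs) buf.isEmpty = c :: normA cs false := by
        simp [normA, hkc, hcs]
      rw [hn]
      rw [show ((buf ++ [PySem.Chars.lowerChar c]).isEmpty) = false from by simp]
      simp [PySem.Chars.lower, List.append_assoc]
    · rw [if_neg (show ¬ (PySem.Chars.isalnum c || c == '\'' || c == '-') = true from hw)]
      cases buf with
      | nil =>
        rw [if_neg (show ¬ ((!(List.isEmpty ([] : List Char))) = true) from by simp)]
        rw [ih [] acc hb]
        simp only [List.isEmpty_nil]
        have hn : mySplit (PySem.Chars.lower (normA (c :: cs) true)) =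
            mySplit (PySem.Chars.lower (normA cs true)) := by
          by_cases hk : keepc c = true
          · have hc : c = ' ' := by
              have : (c == ' ') = true := by
                simp only [keepc, Bool.or_eq_true] at hk
                rcases hk with hk | hk
                · exact absurd hk hw
                · exact hk
              exact beq_iff_eq.mp this
            subst hc
            have : normA (' ' :: cs) true = ' ' :: normA cs true := by simp [normA, keepc]
            rw [this]
            simp [PySem.Chars.lower, mySplit_space, show PySem.Chars.lowerChar ' ' = ' ' from rfl]
          · have : normA (c :: cs) true = normA cs true := by simp [normA, hk]
            rw [this]
        simp only [List.nil_append] at hn ⊢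
        rw [hn]
      | cons b bs =>
        rw [if_pos (show (!(List.isEmpty (b :: bs))) = true from rfl)]
        rw [ih [] (acc ++ [String.ofList (b :: bs)]) (by intro d hd; cases hd)]
        have hn : normA (c :: cs) (List.isEmpty (b :: bs)) = ' ' :: normA cs true := by
          by_cases hk : keepc c = true
          · have hc : c = ' ' := by
              have : (c == ' ') = true := by
                simp only [keepc, Bool.or_eq_true] at hk
                rcases hk with hk | hk
                · exact absurd hk hw
                · exact hk
              exact beq_iff_eq.mp this
            subst hc
            simp [normA, keepc]
          · simp [normA, hk]
        rw [hn]
        have hlow : PySem.Chars.lower (' ' :: normA cs true) =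
            ' ' :: PySem.Chars.lower (normA cs true) := by
          simp [PySem.Chars.lower, show PySem.Chars.lowerChar ' ' = ' ' from rfl]
        rw [hlow]
        rw [mySplit_word (b :: bs) (by intro d hd; exact hb d hd) (PySem.Chars.lower (normA cs true))]
        simp

-- ===== VERDICT (by name: the statement is the Claim_ definition above) =====
theorem get_words_spec : Claim_equal_get_words := by
  intro text _
  unfold Spec_get_words
  simp only [get_words, get_words_alt]
  rw [foldA_eq text.toList 0 [] (le_refl 0) (by simp)]
  rw [tokGo_spec text.toList [] [] (by intro d hd; cases hd)]
  rw [split₀_eq_mySplit]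
  rw [show ((([] : List Char)).getLast? == some ' ') = false from rfl]
  rw [show (List.isEmpty ([] : List Char)) = true from rfl]
  simp only [List.nil_append]
  rcases normA_flags text.toList with h | h
  · rw [h]
  · rw [h]
    rw [show PySem.Chars.lower (' ' :: normA text.toList true) =
        ' ' :: PySem.Chars.lower (normA text.toList true) from by
      simp [PySem.Chars.lower, show PySem.Chars.lowerChar ' ' = ' ' from rfl]]
    rw [mySplit_space]
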